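-- pv_equiv track=rewrite | github.com/GorePradnyesh/aoc21 | P13/process_p13.py | get_dims
-- ===== SOURCE A (Python) =====
-- def get_dims(positions):
--     max_x = 0
--     max_y = 0
--     for pos in positions:
--         if pos[0] > max_x:
--             max_x = pos[0]
--         if pos[1] > max_y:
--             max_y = pos[1]
--     return max_x, max_y
-- ===== SOURCE B (Python) =====
-- def get_dims(positions):
--     xs = sorted([0] + [p[0] for p in positions])
--     ys = sorted([0] + [p[1] for p in positions])
--     return xs[-1], ys[-1]
-- ===== Notes on version B (the rewrite author's own statement) =====
-- stated objective: alternative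
-- what changed: Replaces the single accumulating comparison loop with a sort-based method: sort each coordinate list (with 0 included as the origin candidate) and take the last element.
import Mathlib
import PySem

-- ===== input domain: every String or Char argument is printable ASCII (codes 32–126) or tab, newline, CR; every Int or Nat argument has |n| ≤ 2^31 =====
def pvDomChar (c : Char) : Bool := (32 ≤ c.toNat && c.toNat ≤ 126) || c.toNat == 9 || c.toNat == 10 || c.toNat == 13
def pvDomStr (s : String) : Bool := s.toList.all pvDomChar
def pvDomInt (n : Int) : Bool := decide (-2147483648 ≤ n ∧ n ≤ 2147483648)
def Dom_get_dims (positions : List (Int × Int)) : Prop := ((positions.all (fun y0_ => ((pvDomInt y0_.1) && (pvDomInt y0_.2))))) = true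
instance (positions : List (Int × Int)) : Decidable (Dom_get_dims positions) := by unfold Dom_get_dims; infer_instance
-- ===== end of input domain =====

-- B replaces A's single accumulating comparison loop with a sort-based method:
-- sort each coordinate list (with 0 included as the origin candidate) and take
-- the last element; objective: alternative (not faster).

-- ===== PORT A =====
-- A: one loop over positions maintaining (max_x, max_y), each updated by a comparison.
def get_dims (positions : List (Int × Int)) : Int × Int :=
  positions.foldl
    (fun s pos =>
      let mx := if pos.1 > s.1 then pos.1 else s.1
      let my := if pos.2 > s.2 then pos.2 else s.2
      (mx, my))
    (0, 0)

-- ===== PORT B =====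
-- B: xs = sorted([0] + [p[0] for p in positions]); return xs[-1], ys[-1].
-- xs[-1] is PySem.List.pyGetD xs (-1) 0 (the list is nonempty, so Python never raises).
def get_dims_alt (positions : List (Int × Int)) : Int × Int :=
  let xs := PySem.List.sorted (0 :: positions.map Prod.fst) (fun x => x) false
  let ys := PySem.List.sorted (0 :: positions.map Prod.snd) (fun x => x) false
  (PySem.List.pyGetD xs (-1) 0, PySem.List.pyGetD ys (-1) 0)

-- ===== PRECONDITION & SPEC =====
def Spec_get_dims (positions : List (Int × Int)) (out : Int × Int) : Prop := out = get_dims_alt positions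
instance (positions : List (Int × Int)) (out : Int × Int) : Decidable (Spec_get_dims positions out) := by unfold Spec_get_dims; infer_instance

-- ===== CLAIM (what is proved, stated in full; the proofs are below) =====
def Claim_equal_get_dims : Prop := ∀ (positions : List (Int × Int)), Dom_get_dims positions → Spec_get_dims positions (get_dims positions)

-- ===== LEMMAS AND PROOFS =====
theorem get_dims_foldl_split (l : List (Int × Int)) (a b : Int) :
    l.foldl
      (fun s pos =>
        let mx := if pos.1 > s.1 then pos.1 else s.1
        let my := if pos.2 > s.2 then pos.2 else s.2
        (mx, my))
      (a, b)
    = ((l.map Prod.fst).foldl max a, (l.map Prod.snd).foldl max b) := by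
  induction l generalizing a b with
  | nil => rfl
  | cons p t ih =>
      simp only [List.foldl, List.map]
      rw [ih]
      congr 1 <;> congr 1 <;> simp [max_def] <;> split_ifs <;> omega

theorem pairwise_le_getLast (ls : List Int) (h : ls.Pairwise (· ≤ ·)) (hne : ls ≠ []) :
    ∀ x ∈ ls, x ≤ ls.getLast hne := by
  induction ls with
  | nil => simp
  | cons a t ih =>
      intro x hx
      rcases List.pairwise_cons.mp h with ⟨ha, ht⟩
      cases t with
      | nil => simp at hx; simp [hx, List.getLast]
      | cons b u =>
          rw [List.getLast_cons (by simp)]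
          rcases List.mem_cons.mp hx with rfl | hx'
          · exact le_trans (ha _ (List.getLast_mem _)) (le_refl _)
          · exact ih ht (by simp) x hx'

-- xs[-1] of sorted(0 :: l) equals the running max of l started at 0
theorem getLast_sorted_eq_foldl_max (l : List Int) :
    PySem.List.pyGetD (PySem.List.sorted (0 :: l) (fun x => x) false) (-1) 0
      = l.foldl max 0 := by
  have hne : PySem.List.sorted (0 :: l) (fun x => x) false ≠ [] := by
    intro h
    exact (by simp : (0 : Int) :: l ≠ []) ((PySem.List.sorted_eq_nil_iff _ _ _).mp h)
  rw [PySem.List.pyGetD_neg_one _ _ hne]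
  set s := PySem.List.sorted (0 :: l) (fun x => x) false with hs
  have hperm : s.Perm (0 :: l) := PySem.List.sorted_perm _ _ _
  have hpw : s.Pairwise (· ≤ ·) := by
    simpa using PySem.List.sorted_pairwise (0 :: l) (fun x => x)
  have hM := PySem.List.le_foldl_max l 0
  -- getLast ≤ foldl max 0 l : getLast ∈ s ≃ 0 :: l, every member ≤ running max
  have h1 : s.getLast hne ≤ l.foldl max 0 := by
    have hmem : s.getLast hne ∈ (0 : Int) :: l := hperm.mem_iff.mp (List.getLast_mem hne)
    rcases List.mem_cons.mp hmem with h0 | hl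
    · rw [h0]; exact hM.1
    · exact hM.2 _ hl
  -- foldl max 0 l ≤ getLast : foldl max is a member of 0 :: l hence of s, pairwise
  have h2 : l.foldl max 0 ≤ s.getLast hne := by
    have hmem : l.foldl max 0 ∈ s := by
      apply hperm.mem_iff.mpr
      rcases PySem.List.foldl_max_mem l 0 with h0 | hl
      · rw [h0]; simp
      · exact List.mem_cons_of_mem _ hl
    exact pairwise_le_getLast s hpw hne _ hmem
  exact le_antisymm h1 h2

-- ===== VERDICT (by name: the statement is the Claim_ definition above) =====
theorem get_dims_spec : Claim_equal_get_dims := by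
  intro positions _
  unfold Spec_get_dims get_dims get_dims_alt
  rw [get_dims_foldl_split]
  simp only []
  rw [getLast_sorted_eq_foldl_max, getLast_sorted_eq_foldl_max]
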